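-- pv_equiv track=rewrite | github.com/jtmcg/game-design-course-code | Day1.1/comboActivity.py | SwordDamage
-- ===== SOURCE A (Python) =====
-- swordAttackDictionary = {"slash" : 8, "thrust" : 15, "feint" : 0, "swing" : 10, "chop" : 5}
--
-- def SwordDamage(combo):
--     damage = 0
--
--     for x in range(len(combo)):
--         if x != 0:
--             if combo[x-1] == "feint":
--                 damage += swordAttackDictionary[combo[x]]*2
--             elif combo[x-1] == "thrust" and combo[x] != "feint":
--                 damage += swordAttackDictionary[combo[x]]//2
--             else:
--                 damage += swordAttackDictionary[combo[x]]
--         else: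
--             damage += swordAttackDictionary[combo[x]]
--
--     return damage
-- ===== SOURCE B (Python) =====
-- swordAttackDictionary = {"slash" : 8, "thrust" : 15, "feint" : 0, "swing" : 10, "chop" : 5}
--
-- def SwordDamage(combo):
--     # base pass: every move at its normal damage
--     total = 0
--     for c in combo:
--         total += swordAttackDictionary[c]
--     # correction pass: adjust each successor of a feint / thrust once
--     for i in range(len(combo) - 1):
--         if combo[i] == "feint":
--             total += swordAttackDictionary[combo[i + 1]]
--         elif combo[i] == "thrust" and combo[i + 1] != "feint":
--             v = swordAttackDictionary[combo[i + 1]]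
--             total -= v - v // 2
--     return total
-- ===== Notes on version B (the rewrite author's own statement) =====
-- stated objective: alternative
-- what changed: Replaces the single index loop with prev/cur branch logic by a base-sum pass over the moves plus a separate correction pass over adjacent pairs (doubling after a feint, converting to floor-half after a thrust).
import Mathlib
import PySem

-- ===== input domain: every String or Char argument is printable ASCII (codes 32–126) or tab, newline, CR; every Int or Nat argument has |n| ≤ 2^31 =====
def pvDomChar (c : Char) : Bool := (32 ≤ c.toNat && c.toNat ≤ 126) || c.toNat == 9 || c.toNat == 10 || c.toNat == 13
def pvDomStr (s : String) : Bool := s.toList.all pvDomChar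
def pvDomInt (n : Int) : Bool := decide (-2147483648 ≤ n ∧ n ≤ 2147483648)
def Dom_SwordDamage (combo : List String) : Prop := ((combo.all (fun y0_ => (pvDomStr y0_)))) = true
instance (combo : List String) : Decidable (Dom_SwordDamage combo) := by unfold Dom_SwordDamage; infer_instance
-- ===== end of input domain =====

-- B changes the decomposition only: a base-damage pass plus an adjacent-pair correction pass, same cost.
-- ===== PORT A =====
def swordAttackDictionary : PySem.Dict String Int :=
  ((((PySem.Dict.empty.insert "slash" 8).insert "thrust" 15).insert "feint" 0).insert "swing" 10).insert "chop" 5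

def SwordDamage (combo : List String) : Int :=
  (PySem.List.pyRange 0 (combo.length : Int) 1).foldl (fun damage x =>
    if x ≠ 0 then
      if PySem.List.pyGetD combo (x - 1) "" = "feint" then
        damage + swordAttackDictionary.getD (PySem.List.pyGetD combo x "") 0 * 2
      else if PySem.List.pyGetD combo (x - 1) "" = "thrust" ∧ PySem.List.pyGetD combo x "" ≠ "feint" then
        damage + PySem.Int.floordiv (swordAttackDictionary.getD (PySem.List.pyGetD combo x "") 0) 2
      else
        damage + swordAttackDictionary.getD (PySem.List.pyGetD combo x "") 0
    else
      damage + swordAttackDictionary.getD (PySem.List.pyGetD combo x "") 0) 0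

-- ===== PORT B =====
def swordAttackDictionaryB : PySem.Dict String Int :=
  ((((PySem.Dict.empty.insert "slash" 8).insert "thrust" 15).insert "feint" 0).insert "swing" 10).insert "chop" 5

def SwordDamage_alt (combo : List String) : Int :=
  let base := combo.foldl (fun total c => total + swordAttackDictionaryB.getD c 0) 0
  (PySem.List.pyRange 0 ((combo.length : Int) - 1) 1).foldl (fun total i =>
    if PySem.List.pyGetD combo i "" = "feint" then
      total + swordAttackDictionaryB.getD (PySem.List.pyGetD combo (i + 1) "") 0
    else if PySem.List.pyGetD combo i "" = "thrust" ∧ PySem.List.pyGetD combo (i + 1) "" ≠ "feint" then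
      let v := swordAttackDictionaryB.getD (PySem.List.pyGetD combo (i + 1) "") 0
      total - (v - PySem.Int.floordiv v 2)
    else total) base

-- ===== PRECONDITION & SPEC =====
-- Pre_ excludes combos containing a move outside the attack dictionary, on which Python A raises KeyError.
def Pre_SwordDamage (combo : List String) : Prop :=
  (combo.all (fun c => swordAttackDictionary.contains c)) = true
instance (combo : List String) : Decidable (Pre_SwordDamage combo) := by unfold Pre_SwordDamage; infer_instance

def pvWitness_SwordDamage : List String := ["thrust", "slash", "feint", "chop", "swing"]

def Spec_SwordDamage (combo : List String) (out : Int) : Prop := out = SwordDamage_alt combo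
instance (combo : List String) (out : Int) : Decidable (Spec_SwordDamage combo out) := by unfold Spec_SwordDamage; infer_instance

-- ===== CLAIM (what is proved, stated in full; the proofs are below) =====
def Claim_equal_SwordDamage : Prop := ∀ (combo : List String), Dom_SwordDamage combo → Pre_SwordDamage combo → Spec_SwordDamage combo (SwordDamage combo)

-- ===== LEMMAS AND PROOFS =====

-- lookup shorthand used only in the proofs
def pvV (s : String) : Int := swordAttackDictionary.getD s 0

-- A-side per-index contribution (same branch nesting as the port) and its correction part
def pvGA (combo : List String) (x : Int) : Int :=
  if x ≠ 0 then
    if PySem.List.pyGetD combo (x - 1) "" = "feint" then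
      pvV (PySem.List.pyGetD combo x "") * 2
    else if PySem.List.pyGetD combo (x - 1) "" = "thrust" ∧ PySem.List.pyGetD combo x "" ≠ "feint" then
      PySem.Int.floordiv (pvV (PySem.List.pyGetD combo x "")) 2
    else pvV (PySem.List.pyGetD combo x "")
  else pvV (PySem.List.pyGetD combo x "")

def pvCA (combo : List String) (x : Int) : Int :=
  if x ≠ 0 then
    if PySem.List.pyGetD combo (x - 1) "" = "feint" then
      pvV (PySem.List.pyGetD combo x "")
    else if PySem.List.pyGetD combo (x - 1) "" = "thrust" ∧ PySem.List.pyGetD combo x "" ≠ "feint" then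
      PySem.Int.floordiv (pvV (PySem.List.pyGetD combo x "")) 2 - pvV (PySem.List.pyGetD combo x "")
    else 0
  else 0

-- B-side per-pair correction
def pvCB (combo : List String) (i : Int) : Int :=
  if PySem.List.pyGetD combo i "" = "feint" then
    pvV (PySem.List.pyGetD combo (i + 1) "")
  else if PySem.List.pyGetD combo i "" = "thrust" ∧ PySem.List.pyGetD combo (i + 1) "" ≠ "feint" then
    -(pvV (PySem.List.pyGetD combo (i + 1) "") - PySem.Int.floordiv (pvV (PySem.List.pyGetD combo (i + 1) "")) 2)
  else 0

lemma swordA_step (combo : List String) (acc x : Int) :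
    (if x ≠ 0 then
      if PySem.List.pyGetD combo (x - 1) "" = "feint" then
        acc + swordAttackDictionary.getD (PySem.List.pyGetD combo x "") 0 * 2
      else if PySem.List.pyGetD combo (x - 1) "" = "thrust" ∧ PySem.List.pyGetD combo x "" ≠ "feint" then
        acc + PySem.Int.floordiv (swordAttackDictionary.getD (PySem.List.pyGetD combo x "") 0) 2
      else acc + swordAttackDictionary.getD (PySem.List.pyGetD combo x "") 0
    else acc + swordAttackDictionary.getD (PySem.List.pyGetD combo x "") 0)
    = acc + pvGA combo x := by
  unfold pvGA pvV
  split_ifs <;> ring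

lemma swordB_step (combo : List String) (acc i : Int) :
    (if PySem.List.pyGetD combo i "" = "feint" then
      acc + swordAttackDictionaryB.getD (PySem.List.pyGetD combo (i + 1) "") 0
    else if PySem.List.pyGetD combo i "" = "thrust" ∧ PySem.List.pyGetD combo (i + 1) "" ≠ "feint" then
      acc - (swordAttackDictionaryB.getD (PySem.List.pyGetD combo (i + 1) "") 0
        - PySem.Int.floordiv (swordAttackDictionaryB.getD (PySem.List.pyGetD combo (i + 1) "") 0) 2)
    else acc)
    = acc + pvCB combo i := by
  simp only [show swordAttackDictionaryB = swordAttackDictionary from rfl]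
  unfold pvCB pvV
  split_ifs <;> ring

lemma swordA_as_sum (combo : List String) :
    SwordDamage combo = ((PySem.List.pyRange 0 (combo.length : Int) 1).map (pvGA combo)).sum := by
  unfold SwordDamage
  rw [PySem.List.foldl_congr_mem _ _ (fun acc x => acc + pvGA combo x) _
      (fun acc x _ => swordA_step combo acc x),
    PySem.List.foldl_add, zero_add]

lemma swordB_as_sum (combo : List String) :
    SwordDamage_alt combo = (combo.map pvV).sum
      + ((PySem.List.pyRange 0 ((combo.length : Int) - 1) 1).map (pvCB combo)).sum := by
  unfold SwordDamage_alt
  rw [PySem.List.foldl_congr_mem _ _ (fun acc i => acc + pvCB combo i) _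
      (fun acc i _ => swordB_step combo acc i),
    PySem.List.foldl_add,
    PySem.List.foldl_congr_mem _ _ (fun acc c => acc + pvV c) _
      (fun acc c _ => by
        simp only [show swordAttackDictionaryB = swordAttackDictionary from rfl]; rfl),
    PySem.List.foldl_add, zero_add]

lemma swordGA_split (combo : List String) (x : Int) :
    pvGA combo x = pvV (PySem.List.pyGetD combo x "") + pvCA combo x := by
  unfold pvGA pvCA
  split_ifs <;> ring

-- ===== VERDICT (by name: the statement is the Claim_ definition above) =====
theorem SwordDamage_spec : Claim_equal_SwordDamage := by
  intro combo _ _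
  show SwordDamage combo = SwordDamage_alt combo
  rw [swordA_as_sum, swordB_as_sum]
  have hsplit : ((PySem.List.pyRange 0 (combo.length : Int) 1).map (pvGA combo)).sum
      = ((PySem.List.pyRange 0 (combo.length : Int) 1).map (fun x => pvV (PySem.List.pyGetD combo x ""))).sum
        + ((PySem.List.pyRange 0 (combo.length : Int) 1).map (pvCA combo)).sum := by
    rw [← PySem.List.sum_map_add_int]
    exact congrArg List.sum (List.map_congr_left (fun x _ => swordGA_split combo x))
  have hbase : ((PySem.List.pyRange 0 (combo.length : Int) 1).map
      (fun x => pvV (PySem.List.pyGetD combo x ""))).sum = (combo.map pvV).sum := by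
    have h := PySem.List.map_pyGetD_pyRange_zero combo ""
    simp only [PySem.List.len_eq] at h
    calc ((PySem.List.pyRange 0 (combo.length : Int) 1).map
            (fun x => pvV (PySem.List.pyGetD combo x ""))).sum
        = (((PySem.List.pyRange 0 (combo.length : Int) 1).map
            (fun j => PySem.List.pyGetD combo j "")).map pvV).sum := by
          rw [List.map_map]; simp only [Function.comp_def]
      _ = (combo.map pvV).sum := by rw [h]
  rw [hsplit, hbase]
  congr 1
  -- the two correction sums agree after shifting the index by one
  cases combo with
  | nil => simp [PySem.List.pyRange]
  | cons c rest =>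
    have hm : ((c :: rest).length : Int) = (rest.length : Int) + 1 := by
      push_cast [List.length_cons]; ring
    rw [hm, add_sub_cancel_right,
      PySem.List.pyRange_one_cons (by positivity), List.map_cons, List.sum_cons]
    have h0 : pvCA (c :: rest) 0 = 0 := by unfold pvCA; simp
    rw [h0, zero_add, zero_add, PySem.List.pyRange_one, PySem.List.pyRange_one]
    have e1 : ((rest.length : Int) + 1 - 1).toNat = rest.length := by omega
    have e2 : ((rest.length : Int) - 0).toNat = rest.length := by omega
    rw [e1, e2, List.map_map, List.map_map]
    refine congrArg List.sum (List.map_congr_left ?_)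
    intro k hk
    simp only [Function.comp]
    have hx : (1 : Int) + (k : Int) = (0 + (k : Int)) + 1 := by ring
    rw [hx]
    unfold pvCA pvCB
    have hne : (0 + (k : Int)) + 1 ≠ 0 := by omega
    rw [if_pos hne]
    have hsub : (0 + (k : Int)) + 1 - 1 = 0 + (k : Int) := by ring
    rw [hsub]
    split_ifs <;> ring
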